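-- pv_equiv track=rewrite | github.com/angelalamb/document_search_target_case_study | string_match.py | index_match
-- ===== SOURCE A (Python) =====
-- def index_match_helper(file_dict, terms, idx):
--     curr_idx = idx + 1
--     for i in range(1, len(terms)):
--         if terms[i] not in file_dict.keys() or curr_idx not in file_dict[terms[i]]:
--             return False
--         else:
--             curr_idx += 1
--     return True
--
-- def index_match(file_dict, term):
--     result = 0
--     terms = term.split()
--     if len(terms) == 1 and term in file_dict.keys():
--         return len(file_dict[term])
--     if terms[0] in file_dict.keys():
--         # Look at each instance of the first term.
--         idxs = file_dict[terms[0]]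
--         for idx in idxs:
--             if index_match_helper(file_dict, terms, idx):
--                 result += 1
--     return result
-- ===== SOURCE B (Python) =====
-- def index_match(file_dict, term):
--     terms = term.split()
--     if len(terms) == 1 and term in file_dict:
--         return len(file_dict[term])
--     first = terms[0]  # IndexError on whitespace-only term, like the original
--     if first not in file_dict:
--         return 0
--     # Intersect shifted posting lists of the remaining terms into one set of
--     # valid start positions, then count starts (with duplicates) in that set.
--     S = None
--     for i in range(1, len(terms)):
--         t = terms[i]
--         if t not in file_dict:
--             return 0
--         shifted = {p - i for p in file_dict[t]}
--         S = shifted if S is None else (S & shifted)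
--     starts = file_dict[first]
--     if S is None:
--         return len(starts)
--     return sum(1 for idx in starts if idx in S)
-- ===== Notes on version B (the rewrite author's own statement) =====
-- stated objective: alternative
-- what changed: Instead of re-scanning every later term's posting list for each occurrence of the first term, B intersects the shifted posting lists of the later terms into one set of valid start positions and then counts the first term's positions in that set in a single pass.
import Mathlib
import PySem

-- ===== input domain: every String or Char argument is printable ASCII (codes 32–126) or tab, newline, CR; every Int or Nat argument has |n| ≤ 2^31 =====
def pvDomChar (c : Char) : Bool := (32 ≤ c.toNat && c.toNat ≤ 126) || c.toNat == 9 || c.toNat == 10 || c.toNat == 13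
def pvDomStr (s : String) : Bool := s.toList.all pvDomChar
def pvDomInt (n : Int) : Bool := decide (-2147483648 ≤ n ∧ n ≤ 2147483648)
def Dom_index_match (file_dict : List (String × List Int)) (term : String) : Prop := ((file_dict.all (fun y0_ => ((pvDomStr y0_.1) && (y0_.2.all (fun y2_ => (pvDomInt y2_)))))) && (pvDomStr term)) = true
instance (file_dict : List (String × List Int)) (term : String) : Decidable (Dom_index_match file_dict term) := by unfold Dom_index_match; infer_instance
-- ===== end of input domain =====

-- B replaces A's per-start rescans of every later posting list by one set intersection of
-- shifted posting lists followed by a single counting pass over the first list (alternative).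

-- ===== PORT A =====
-- helper loop 'for i in range(1, len(terms))' rendered as structural recursion over terms[1:]
def index_match_helper_go (file_dict : PySem.Dict String (List Int))
    (rest : List String) (curr : Int) : Bool :=
  match rest with
  | [] => true
  | t :: ts =>
    match PySem.Dict.get? file_dict t with
    | none => false
    | some l => if l.contains curr then index_match_helper_go file_dict ts (curr + 1) else false

def index_match_helper (file_dict : PySem.Dict String (List Int))
    (terms : List String) (idx : Int) : Bool :=
  index_match_helper_go file_dict (terms.drop 1) (idx + 1)

def index_match (file_dict : List (String × List Int)) (term : String) : Int :=
  let d : PySem.Dict String (List Int) := PySem.Dict.mk file_dict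
  let terms := PySem.Str.split₀ term
  if terms.length = 1 ∧ (PySem.Dict.get? d term).isSome then
    ((PySem.Dict.getD d term []).length : Int)
  else
    match terms with
    | [] => 0   -- Python raises IndexError at terms[0]; excluded by Pre_index_match
    | t0 :: _ =>
      match PySem.Dict.get? d t0 with
      | none => 0
      | some idxs =>
        idxs.foldl (fun result idx =>
          if index_match_helper d terms idx then result + 1 else result) 0

-- ===== PORT B =====
-- the 'for i in range(1, len(terms))' intersection loop, as recursion over terms[1:];
-- outer 'none' = an absent term (early 'return 0'), inner Option = Python's 'S = None'
def index_match_alt_go (file_dict : PySem.Dict String (List Int))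
    (rest : List String) (i : Int) (S : Option (PySem.Set Int)) :
    Option (Option (PySem.Set Int)) :=
  match rest with
  | [] => some S
  | t :: ts =>
    match PySem.Dict.get? file_dict t with
    | none => none
    | some l =>
      let shifted : PySem.Set Int := PySem.Set.ofList (l.map (fun p => p - i))
      let S' := match S with
        | none => shifted
        | some s => PySem.Set.inter s shifted
      index_match_alt_go file_dict ts (i + 1) (some S')

def index_match_alt (file_dict : List (String × List Int)) (term : String) : Int :=
  let d : PySem.Dict String (List Int) := PySem.Dict.mk file_dict
  let terms := PySem.Str.split₀ term
  if terms.length = 1 ∧ (PySem.Dict.get? d term).isSome then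
    ((PySem.Dict.getD d term []).length : Int)
  else
    match terms with
    | [] => 0   -- Python raises IndexError at terms[0]; excluded by Pre_index_match
    | t0 :: rest =>
      match PySem.Dict.get? d t0 with
      | none => 0
      | some starts =>
        match index_match_alt_go d rest 1 none with
        | none => 0
        | some none => (starts.length : Int)
        | some (some S) => ((starts.countP (fun idx => S.contains idx) : Nat) : Int)

-- ===== PRECONDITION & SPEC =====
-- Pre_ excludes only whitespace-only terms, on which A raises IndexError at terms[0].
def Pre_index_match (file_dict : List (String × List Int)) (term : String) : Prop :=
  PySem.Str.split₀ term ≠ []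
instance (file_dict : List (String × List Int)) (term : String) : Decidable (Pre_index_match file_dict term) := by unfold Pre_index_match; infer_instance

def pvWitness_index_match : (List (String × List Int)) × String :=
  ([("a b", [0, 2]), ("a", [0, 3, 7]), ("b", [1, 4])], "a b")

def Spec_index_match (file_dict : List (String × List Int)) (term : String) (out : Int) : Prop := out = index_match_alt file_dict term
instance (file_dict : List (String × List Int)) (term : String) (out : Int) : Decidable (Spec_index_match file_dict term out) := by unfold Spec_index_match; infer_instance

-- ===== CLAIM (what is proved, stated in full; the proofs are below) =====
def Claim_equal_index_match : Prop := ∀ (file_dict : List (String × List Int)) (term : String), Dom_index_match file_dict term → Pre_index_match file_dict term → Spec_index_match file_dict term (index_match file_dict term)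

-- ===== LEMMAS AND PROOFS =====

-- membership in Python's 'S' (None = every position is valid)
def pvMemS (S : Option (PySem.Set Int)) (x : Int) : Bool :=
  match S with
  | none => true
  | some s => s.contains x

theorem pvMemS_none (x : Int) : pvMemS none x = true := rfl
theorem pvMemS_some (s : PySem.Set Int) (x : Int) : pvMemS (some s) x = s.contains x := rfl

-- if the intersection loop hits an absent term, A's helper rejects every start
theorem alt_go_none_helper (d : PySem.Dict String (List Int)) :
    ∀ (rest : List String) (i : Int) (S : Option (PySem.Set Int)),
      index_match_alt_go d rest i S = none →
      ∀ curr, index_match_helper_go d rest curr = false := by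
  intro rest
  induction rest with
  | nil => intro i S h; simp [index_match_alt_go] at h
  | cons t ts ih =>
    intro i S h curr
    simp only [index_match_alt_go, index_match_helper_go] at *
    cases hg : PySem.Dict.get? d t with
    | none => simp
    | some l =>
      rw [hg] at h
      simp only at h
      have := ih _ _ h (curr + 1)
      simp [this]

-- if the loop returns a set, membership in it is exactly A's helper together with the prior S
theorem inter_contains (s t : PySem.Set Int) (x : Int) :
    (PySem.Set.inter s t).contains x = (s.contains x && t.contains x) := by
  simp only [PySem.Set.contains_eq_listContains]
  by_cases h1 : x ∈ s <;> by_cases h2 : x ∈ t <;>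
    simp [PySem.Set.mem_inter, h1, h2]

theorem shifted_contains (l : List Int) (i x : Int) :
    (PySem.Set.ofList (l.map (fun p => p - i))).contains x = l.contains (x + i) := by
  simp only [PySem.Set.contains_eq_listContains]
  by_cases hm : (x + i) ∈ l
  · have : x ∈ PySem.Set.ofList (l.map (fun p => p - i)) := by
      rw [PySem.Set.mem_ofList]
      exact List.mem_map.mpr ⟨x + i, hm, by ring⟩
    simp [this, hm]
  · have : x ∉ PySem.Set.ofList (l.map (fun p => p - i)) := by
      rw [PySem.Set.mem_ofList]
      intro hc
      obtain ⟨p, hp, hpe⟩ := List.mem_map.mp hc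
      have hpx : p = x + i := by omega
      exact hm (hpx ▸ hp)
    simp [this, hm]

theorem helper_go_cons (d : PySem.Dict String (List Int)) (t : String) (ts : List String)
    (l : List Int) (hg : PySem.Dict.get? d t = some l) (curr : Int) :
    index_match_helper_go d (t :: ts) curr
      = (l.contains curr && index_match_helper_go d ts (curr + 1)) := by
  simp only [index_match_helper_go, hg]
  cases l.contains curr <;> simp

-- if the loop returns a set, membership in it is exactly A's helper together with the prior S
theorem alt_go_some_helper (d : PySem.Dict String (List Int)) :
    ∀ (rest : List String) (i : Int) (S S' : Option (PySem.Set Int)),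
      index_match_alt_go d rest i S = some S' →
      ∀ x, pvMemS S' x = (pvMemS S x && index_match_helper_go d rest (x + i)) := by
  intro rest
  induction rest with
  | nil =>
    intro i S S' h x
    simp [index_match_alt_go] at h
    simp [h, index_match_helper_go]
  | cons t ts ih =>
    intro i S S' h x
    simp only [index_match_alt_go] at h
    cases hg : PySem.Dict.get? d t with
    | none => rw [hg] at h; simp at h
    | some l =>
      rw [hg] at h
      simp only at h
      rw [helper_go_cons d t ts l hg (x + i)]
      have harith : x + (i + 1) = (x + i) + 1 := by ring
      cases S with
      | none =>
        have hx := ih _ _ _ h x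
        rw [harith] at hx
        simp only [pvMemS] at hx ⊢
        rw [hx, shifted_contains, Bool.true_and]
      | some s =>
        have hx := ih _ _ _ h x
        rw [harith] at hx
        simp only [pvMemS] at hx ⊢
        rw [hx, inter_contains, shifted_contains, Bool.and_assoc]

-- A's counting fold is countP of the helper
theorem foldl_count (f : Int → Bool) :
    ∀ (l : List Int) (c : Int),
      l.foldl (fun r x => if f x then r + 1 else r) c = c + (l.countP f : Nat) := by
  intro l
  induction l with
  | nil => intro c; simp
  | cons a as ih =>
    intro c
    simp only [List.foldl, List.countP_cons]
    cases hf : f a with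
    | true => rw [ih]; simp; ring
    | false => rw [ih]; simp

theorem countP_congr' (l : List Int) (f g : Int → Bool) (h : ∀ x, f x = g x) :
    l.countP f = l.countP g := by
  apply List.countP_congr; intro x _; rw [h]

-- ===== VERDICT (by name: the statement is the Claim_ definition above) =====
theorem index_match_spec : Claim_equal_index_match := by
  intro file_dict term _ hpre
  unfold Spec_index_match index_match index_match_alt
  simp only []
  set d : PySem.Dict String (List Int) := PySem.Dict.mk file_dict with hd
  set terms := PySem.Str.split₀ term with hterms
  by_cases hfast : terms.length = 1 ∧ (PySem.Dict.get? d term).isSome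
  · simp [hfast]
  · simp only [if_neg hfast]
    cases hts : terms with
    | nil => exact absurd (hterms ▸ hts) hpre
    | cons t0 rest =>
      cases hg : PySem.Dict.get? d t0 with
      | none => simp [hg]
      | some starts =>
        simp only [hg]
        cases hgo : index_match_alt_go d rest 1 none with
        | none =>
          have hall := alt_go_none_helper d rest 1 none hgo
          rw [foldl_count]
          have hz : starts.countP (index_match_helper d (t0 :: rest)) = 0 := by
            apply List.countP_eq_zero.mpr
            intro x _
            simp only [index_match_helper, List.drop_succ_cons, List.drop_zero]
            simp [hall (x + 1)]
          rw [hz]; simp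
        | some S =>
          have hmem := alt_go_some_helper d rest 1 none S hgo
          rw [foldl_count]
          have hcnt : starts.countP (index_match_helper d (t0 :: rest))
              = starts.countP (fun idx => pvMemS S idx) := by
            apply countP_congr'
            intro x
            have hx := hmem x
            rw [pvMemS_none, Bool.true_and] at hx
            simp only [index_match_helper, List.drop_succ_cons, List.drop_zero]
            exact hx.symm
          rw [hcnt]
          cases S with
          | none => simp [pvMemS_none]
          | some s => simp [pvMemS_some]
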